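-- pv_equiv track=rewrite | github.com/Farrhouq/TiNotez | password_manager/logic/farsan.py | farsan_decrypt
-- ===== SOURCE A (Python) =====
-- import math
--
-- def farsan_decrypt(strin: str):
--     '''Decrypts a string based on the `Farsan` encryption method.'''
--     string = strin
--     decoded = []
--     row = math.ceil(len(string)**0.5)
--     hanging = len(string) % row
--     intend = len(string)//row
--     i = 0
--
--     hang = 0
--     rows = []
--     while i < len(string):
--         cut = string[i:i+intend]
--         if hang < hanging:
--             cut = string[i:i+intend+1]
--             i += intend+1
--         else:
--             i += intend
--         rows.append(cut)
--         hang += 1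
--
--     i = 0
--     hang = 0
--     reved = True
--     for i in range(len(rows[0])):
--         reved = not reved
--         c = rows
--         if reved:
--             c = rows[::-1]
--
--         for j in c:
--             if len(j) > i:
--                 decoded.append(j[i])
--     return ''.join(decoded)[::-1]
-- ===== SOURCE B (Python) =====
-- import math
--
-- def farsan_decrypt(strin: str):
--     '''Decrypts a string based on the `Farsan` encryption method.'''
--     n = len(strin)
--     row = math.ceil(n ** 0.5)
--     intend, hanging = n // row, n % row
--     full = intend * row
--
--     def src(k):
--         # source index of the k-th character of the (pre-reversal) decoded stream,
--         # computed by pure index arithmetic: column c, slot j within the column,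
--         # boustrophedon row r, then the row's offset in the original string.
--         if k < full:
--             c, j = divmod(k, row)
--             r = j if c % 2 == 0 else row - 1 - j
--         else:
--             c, j = intend, k - full
--             r = j if intend % 2 == 0 else hanging - 1 - j
--         return r * intend + min(r, hanging) + c
--
--     return ''.join(strin[src(n - 1 - m)] for m in range(n))
-- ===== Notes on version B (the rewrite author's own statement) =====
-- stated objective: alternative
-- what changed: B computes the inverse permutation in closed form: for each output position it derives the source index by pure index arithmetic (column = k div row, slot = k mod row, boustrophedon row by column parity, then the row's string offset), so it never builds the row list, never traverses columns with a toggled reversal, and never reverses at the end.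
import Mathlib
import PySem

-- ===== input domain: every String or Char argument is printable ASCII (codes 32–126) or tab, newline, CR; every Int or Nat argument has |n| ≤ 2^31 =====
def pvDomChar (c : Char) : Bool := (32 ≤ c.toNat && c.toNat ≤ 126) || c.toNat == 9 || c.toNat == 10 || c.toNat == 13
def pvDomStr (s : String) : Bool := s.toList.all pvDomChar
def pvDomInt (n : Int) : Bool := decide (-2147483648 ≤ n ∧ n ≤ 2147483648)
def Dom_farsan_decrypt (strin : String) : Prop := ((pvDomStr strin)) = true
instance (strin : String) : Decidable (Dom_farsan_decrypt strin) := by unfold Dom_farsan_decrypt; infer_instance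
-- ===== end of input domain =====

-- B replaces A's row-building and zig-zag column traversal by a closed-form inverse
-- permutation: each output position gathers its character directly by index arithmetic
-- (no rows list, no per-column reversal, no final reverse); alternative algorithm, same cost.

-- math.ceil(n ** 0.5), exact for all string lengths occurring here.
def pvCeilSqrt (n : Nat) : Nat :=
  if Nat.sqrt n * Nat.sqrt n = n then Nat.sqrt n else Nat.sqrt n + 1

-- ===== PORT A =====
-- A's while loop: i and hang counters, branch on hang < hanging; fuel s.length+1 is enough
-- because each executed iteration advances i by at least 1 (intend ≥ 1 whenever the loop runs).
-- string[i:i+L] with i, L ≥ 0 is exactly (s.drop i).take L.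
def farsanRowsLoop (s : List Char) (intend hanging : Nat) :
    Nat → Nat → Nat → List (List Char) → List (List Char)
  | 0, _, _, rows => rows
  | fuel+1, i, hang, rows =>
    if i < s.length then
      if hang < hanging then
        farsanRowsLoop s intend hanging fuel (i + (intend+1)) (hang+1)
          (rows ++ [(s.drop i).take (intend+1)])
      else
        farsanRowsLoop s intend hanging fuel (i + intend) (hang+1)
          (rows ++ [(s.drop i).take intend])
    else rows

def farsanDecodeA (s : List Char) : List Char :=
  let row := pvCeilSqrt s.length
  let hanging := s.length % row
  let intend := s.length / row
  let rows := farsanRowsLoop s intend hanging (s.length + 1) 0 0 []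
  -- len(rows[0]); Pre_ guarantees rows ≠ [] (Python raises on "" via ZeroDivision earlier)
  let width := (rows.headD []).length
  ((List.range width).foldl (fun (st : Bool × List Char) i =>
      let reved := !st.1
      let c := if reved then rows.reverse else rows
      (reved, c.foldl (fun d j => if i < j.length then d ++ [j.getD i ' '] else d) st.2))
    (true, [])).2

def farsan_decrypt (strin : String) : String :=
  String.ofList (farsanDecodeA strin.toList).reverse

-- ===== PORT B =====
-- src(k): source index of the k-th character of the pre-reversal decoded stream.
def srcB (row intend hanging k : Nat) : Nat :=
  if k < intend * row then
    let c := k / row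
    let j := k % row
    let r := if c % 2 = 0 then j else row - 1 - j
    r * intend + min r hanging + c
  else
    let j := k - intend * row
    let r := if intend % 2 = 0 then j else hanging - 1 - j
    r * intend + min r hanging + intend

-- strin[src(n-1-m)]: the index is always in range on Pre_, so getD's default is never used.
def farsan_decrypt_alt (strin : String) : String :=
  let s := strin.toList
  let n := s.length
  let row := pvCeilSqrt n
  let intend := n / row
  let hanging := n % row
  String.ofList ((List.range n).map (fun m => s.getD (srcB row intend hanging (n - 1 - m)) ' '))

-- ===== PRECONDITION & SPEC =====
-- Pre_ excludes only the empty string, on which A raises ZeroDivisionError (row = 0).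
def Pre_farsan_decrypt (strin : String) : Prop := strin ≠ ""
instance (strin : String) : Decidable (Pre_farsan_decrypt strin) := by
  unfold Pre_farsan_decrypt; infer_instance

def pvWitness_farsan_decrypt : String := "abcde"

def Spec_farsan_decrypt (strin : String) (out : String) : Prop := out = farsan_decrypt_alt strin
instance (strin : String) (out : String) : Decidable (Spec_farsan_decrypt strin out) := by
  unfold Spec_farsan_decrypt; infer_instance

-- ===== CLAIM =====
def Claim_equal_farsan_decrypt : Prop := ∀ (strin : String), Dom_farsan_decrypt strin → Pre_farsan_decrypt strin → Spec_farsan_decrypt strin (farsan_decrypt strin)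

-- ===== LEMMAS AND PROOFS =====

-- proof-only helpers: the explicit row list A's while loop produces, and its description
def rowsOf (s : List Char) : List Nat → Nat → List (List Char)
  | [], _ => []
  | L :: Ls, i => (s.drop i).take L :: rowsOf s Ls (i + L)

def pvOff (q h r : Nat) : Nat := r*q + min r h
def pvLen (q h r : Nat) : Nat := if r < h then q+1 else q
def pvRow (s : List Char) (q h r : Nat) : List Char := (s.drop (pvOff q h r)).take (pvLen q h r)
def pvRows (s : List Char) (q h rr : Nat) : List (List Char) :=
  (List.range rr).map (pvRow s q h)
def pvBlockG (rows : List (List Char)) (i : Nat) : List Char :=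
  ((if i % 2 = 0 then rows else rows.reverse).filter
      (fun j => decide (i < j.length))).map (fun j => j.getD i ' ')
def pvTgt (s : List Char) (rr q h k : Nat) : Char := s.getD (srcB rr q h k) ' '

-- A's loop, once hang ≥ hanging: consumes k rows of length intend.
lemma rowsLoop_tail (s : List Char) (intend hanging : Nat) (hint : 1 ≤ intend) :
    ∀ (k fuel i hang : Nat) (rows : List (List Char)),
      hanging ≤ hang → s.length = i + k * intend → k ≤ fuel →
      farsanRowsLoop s intend hanging fuel i hang rows
        = rows ++ rowsOf s (List.replicate k intend) i := by
  intro k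
  induction k with
  | zero =>
    intro fuel i hang rows _ hlen _
    cases fuel with
    | zero => simp [farsanRowsLoop, rowsOf]
    | succ m =>
      have : ¬ i < s.length := by omega
      simp [farsanRowsLoop, this, rowsOf]
  | succ k ih =>
    intro fuel i hang rows hh hlen hf
    cases fuel with
    | zero => omega
    | succ m =>
      have hmul0 : (k + 1) * intend = k * intend + intend := Nat.succ_mul k intend
      have h1 : i < s.length := by omega
      have h2 : ¬ hang < hanging := by omega
      have hrec := ih m (i + intend) (hang + 1) (rows ++ [(s.drop i).take intend])
        (by omega) (by omega) (by omega)
      simp [farsanRowsLoop, h1, h2, hrec, rowsOf, List.replicate_succ]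

-- A's loop from the start: j rows of length intend+1 (the hanging rows), then k rows of intend.
lemma rowsLoop_full (s : List Char) (intend hanging : Nat) (hint : 1 ≤ intend) :
    ∀ (j k fuel i hang : Nat) (rows : List (List Char)),
      hang + j = hanging → s.length = i + j * (intend + 1) + k * intend → j + k ≤ fuel →
      farsanRowsLoop s intend hanging fuel i hang rows
        = rows ++ rowsOf s (List.replicate j (intend + 1) ++ List.replicate k intend) i := by
  intro j
  induction j with
  | zero =>
    intro k fuel i hang rows hh hlen hf
    have := rowsLoop_tail s intend hanging hint k fuel i hang rows (by omega) (by omega) (by omega)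
    simpa using this
  | succ j ih =>
    intro k fuel i hang rows hh hlen hf
    cases fuel with
    | zero => omega
    | succ m =>
      have hmul0 : (j + 1) * (intend + 1) = j * (intend + 1) + (intend + 1) := Nat.succ_mul j (intend + 1)
      have h1 : i < s.length := by omega
      have h2 : hang < hanging := by omega
      have hrec := ih k m (i + (intend + 1)) (hang + 1) (rows ++ [(s.drop i).take (intend + 1)])
        (by omega) (by omega) (by omega)
      simp [farsanRowsLoop, h1, h2, hrec, rowsOf, List.replicate_succ]

-- rowsOf on replicated lengths q only
lemma rowsOf_rep0 (s : List Char) (q : Nat) :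
    ∀ (b i : Nat),
      rowsOf s (List.replicate b q) i
        = (List.range b).map (fun r => (s.drop (i + r*q)).take q) := by
  intro b
  induction b with
  | zero => intro i; simp [rowsOf]
  | succ b ih =>
    intro i
    rw [List.replicate_succ]
    simp only [rowsOf]
    rw [ih (i+q), List.range_succ_eq_map]
    simp only [List.map_cons, List.map_map]
    congr 1
    · simp
    · apply List.map_congr_left
      intro r _
      simp only [Function.comp]
      congr 2
      have := Nat.succ_mul r q
      omega

-- rowsOf on the concrete length list, in map-over-range form.
lemma rowsOf_rep (s : List Char) (q : Nat) :
    ∀ (a b i : Nat),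
      rowsOf s (List.replicate a (q+1) ++ List.replicate b q) i
        = (List.range (a+b)).map
            (fun r => (s.drop (i + r*q + min r a)).take (if r < a then q+1 else q)) := by
  intro a
  induction a with
  | zero =>
    intro b i
    rw [List.replicate_zero, List.nil_append, rowsOf_rep0]
    simp
  | succ a ih =>
    intro b i
    rw [List.replicate_succ, List.cons_append]
    simp only [rowsOf]
    rw [ih b (i+(q+1))]
    rw [show a + 1 + b = (a + b) + 1 by omega, List.range_succ_eq_map]
    simp only [List.map_cons, List.map_map]
    congr 1
    · simp
    · apply List.map_congr_left
      intro r _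
      simp only [Function.comp]
      by_cases hra : r < a
      · rw [if_pos hra, if_pos (by omega : r.succ < a + 1)]
        congr 2
        have := Nat.succ_mul r q
        omega
      · rw [if_neg hra, if_neg (by omega : ¬ r.succ < a + 1)]
        congr 2
        have := Nat.succ_mul r q
        omega

-- the boustrophedon fold, flattened into per-column blocks
lemma cols_flatten (rows : List (List Char)) :
    ∀ w : Nat,
      (List.range w).foldl (fun (st : Bool × List Char) i =>
          let reved := !st.1
          let c := if reved then rows.reverse else rows
          (reved, c.foldl (fun d j => if i < j.length then d ++ [j.getD i ' '] else d) st.2))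
        (true, [])
      = (decide (w % 2 = 0),
         ((List.range w).map (pvBlockG rows)).flatten) := by
  intro w
  simp only [pvBlockG]
  induction w with
  | zero => simp
  | succ w ih =>
    rw [List.range_succ, List.foldl_append, ih, List.map_append, List.flatten_append]
    have hfold : ∀ (c : List (List Char)) (acc : List Char),
        c.foldl (fun d j => if w < j.length then d ++ [j.getD w ' '] else d) acc
          = acc ++ (c.filter (fun j => decide (w < j.length))).map (fun j => j.getD w ' ') := by
      intro c acc
      have := PySem.List.foldl_append_if (fun j : List Char => decide (w < j.length))
        (fun j => j.getD w ' ') c acc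
      simpa using this
    simp only [List.foldl_cons, List.foldl_nil, List.map_cons, List.map_nil,
      List.flatten_cons, List.flatten_nil, List.append_nil]
    by_cases hw : w % 2 = 0
    · have h1 : ¬ (w + 1) % 2 = 0 := by omega
      simp only [hw, h1, decide_true, decide_false, Bool.not_true]
      rw [hfold]
      simp [pvBlockG, hw]
    · have h1 : (w + 1) % 2 = 0 := by omega
      simp only [hw, h1, decide_true, decide_false, Bool.not_true, Bool.not_false,
        ite_true, ite_false]
      rw [hfold]
      simp [pvBlockG, hw]

-- reverse of a map over range, as a map over range
lemma rev_map_range {α : Type} (f : Nat → α) (n : Nat) :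
    ((List.range n).map f).reverse = (List.range n).map (fun m => f (n-1-m)) := by
  apply List.ext_getElem (by simp)
  intro i h1 h2
  simp [List.getElem_reverse]

-- element of a row, as an element of the string
lemma row_getD (s : List Char) (q h r i : Nat) (hi : i < pvLen q h r)
    (hle : pvOff q h r + pvLen q h r ≤ s.length) :
    (pvRow s q h r).getD i ' ' = s.getD (pvOff q h r + i) ' ' := by
  unfold pvRow
  rw [List.getD_eq_getElem _ _ (by simp [List.length_take, List.length_drop]; omega),
      List.getD_eq_getElem _ _ (by omega)]
  simp [List.getElem_take, List.getElem_drop]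

lemma row_length (s : List Char) (q h r : Nat)
    (hle : pvOff q h r + pvLen q h r ≤ s.length) :
    (pvRow s q h r).length = pvLen q h r := by
  unfold pvRow
  simp [List.length_take, List.length_drop]
  omega

-- rows fit in the string
lemma off_len_le (s : List Char) (q h rr r : Nat) (hn : s.length = q*rr + h)
    (hh : h < rr) (hr : r < rr) : pvOff q h r + pvLen q h r ≤ s.length := by
  unfold pvOff pvLen
  have h1 : (r+1) * q ≤ rr * q := Nat.mul_le_mul_right q (by omega)
  have h2 : rr * q = q * rr := Nat.mul_comm rr q
  have h3 : (r+1) * q = r*q + q := Nat.succ_mul r q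
  split <;> omega

-- full columns: every row survives the length filter, and the block is a gather
lemma block_full (s : List Char) (q h rr i : Nat) (hn : s.length = q*rr + h)
    (hh : h < rr) (hi : i < q) :
    pvBlockG (pvRows s q h rr) i = (List.range rr).map (fun j => pvTgt s rr q h (i*rr + j)) := by
  have hlen : ∀ r < rr, (pvRow s q h r).length = pvLen q h r := fun r hr =>
    row_length s q h r (off_len_le s q h rr r hn hh hr)
  have hkeep : ∀ j ∈ (if i % 2 = 0 then pvRows s q h rr else (pvRows s q h rr).reverse),
      decide (i < j.length) = true := by
    intro j hj
    have hj' : j ∈ pvRows s q h rr := by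
      rcases (by split at hj <;> [exact hj; exact List.mem_reverse.mp hj] : j ∈ pvRows s q h rr) with h'
      exact h'
    rcases List.mem_map.mp hj' with ⟨r, hr, rfl⟩
    have hr' : r < rr := List.mem_range.mp hr
    rw [hlen r hr']
    unfold pvLen
    split <;> simp <;> omega
  have hrowmap : (pvRows s q h rr).map (fun j => j.getD i ' ')
      = (List.range rr).map (fun r => s.getD (pvOff q h r + i) ' ') := by
    unfold pvRows
    rw [List.map_map]
    apply List.map_congr_left
    intro r hr
    have hr' : r < rr := List.mem_range.mp hr
    simp only [Function.comp]
    exact row_getD s q h r i (by unfold pvLen; split <;> omega)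
      (off_len_le s q h rr r hn hh hr')
  have hsrc : ∀ j < rr, srcB rr q h (i*rr + j)
      = (if i % 2 = 0 then pvOff q h j else pvOff q h (rr - 1 - j)) + i := by
    intro j hj
    have hrr : 0 < rr := by omega
    have hklt : i*rr + j < q * rr := by
      have : (i+1) * rr ≤ q * rr := Nat.mul_le_mul_right rr (by omega)
      have h3 : (i+1) * rr = i*rr + rr := Nat.succ_mul i rr
      omega
    unfold srcB
    rw [if_pos hklt]
    have hdiv : (i*rr + j) / rr = i := by
      rw [Nat.add_comm, Nat.add_mul_div_right _ _ hrr, Nat.div_eq_of_lt hj]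
      omega
    have hmod : (i*rr + j) % rr = j := by
      rw [Nat.add_comm, Nat.add_mul_mod_self_right, Nat.mod_eq_of_lt hj]
    rw [hdiv, hmod]
    by_cases hp : i % 2 = 0 <;> simp [hp, pvOff]
  unfold pvBlockG
  rw [List.filter_eq_self.mpr hkeep]
  by_cases hpar : i % 2 = 0
  · rw [if_pos hpar, hrowmap]
    apply List.map_congr_left
    intro j hj
    have hj' : j < rr := List.mem_range.mp hj
    unfold pvTgt
    rw [hsrc j hj', if_pos hpar]
  · rw [if_neg hpar]
    rw [show ((pvRows s q h rr).reverse.map (fun j => j.getD i ' '))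
          = ((pvRows s q h rr).map (fun j => j.getD i ' ')).reverse by
        rw [List.map_reverse]]
    rw [hrowmap, rev_map_range]
    apply List.map_congr_left
    intro j hj
    have hj' : j < rr := List.mem_range.mp hj
    unfold pvTgt
    rw [hsrc j hj', if_neg hpar]

-- last, ragged column (only when hanging > 0): only the first h rows survive
lemma block_last (s : List Char) (q h rr : Nat) (hn : s.length = q*rr + h)
    (hh : h < rr) (hq : 1 ≤ q) (hpos : 0 < h) :
    pvBlockG (pvRows s q h rr) q = (List.range h).map (fun j => pvTgt s rr q h (q*rr + j)) := by
  have hfilter : (pvRows s q h rr).filter (fun j => decide (q < j.length))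
      = (List.range h).map (pvRow s q h) := by
    unfold pvRows
    rw [List.filter_map]
    simp only [Function.comp_def]
    have hcond : (List.range rr).filter (fun r => decide (q < (pvRow s q h r).length))
        = (List.range rr).filter (fun r => decide (r < h)) := by
      apply List.filter_congr
      intro r hr
      have hr' : r < rr := List.mem_range.mp hr
      rw [row_length s q h r (off_len_le s q h rr r hn hh hr')]
      unfold pvLen
      split <;> simp <;> omega
    rw [hcond]
    congr 1
    rw [show rr = h + (rr - h) by omega, List.range_add, List.filter_append]
    rw [List.filter_eq_self.mpr (by intro a ha; simpa using List.mem_range.mp ha)]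
    rw [List.filter_eq_nil_iff.mpr (by intro a ha; rcases List.mem_map.mp ha with ⟨b, _, rfl⟩; simp)]
    simp
  have hsrc : ∀ j < h, srcB rr q h (q*rr + j)
      = (if q % 2 = 0 then pvOff q h j else pvOff q h (h - 1 - j)) + q := by
    intro j hj
    unfold srcB
    rw [if_neg (by omega)]
    simp only [Nat.add_sub_cancel_left]
    by_cases hp : q % 2 = 0 <;> simp [hp, pvOff]
  have hrowmap : ∀ (l : List Nat), (∀ r ∈ l, r < h) →
      (l.map (pvRow s q h)).map (fun j => j.getD q ' ')
        = l.map (fun r => s.getD (pvOff q h r + q) ' ') := by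
    intro l hl
    rw [List.map_map]
    apply List.map_congr_left
    intro r hr
    have hr' : r < h := hl r hr
    simp only [Function.comp]
    exact row_getD s q h r q (by unfold pvLen; rw [if_pos hr']; omega)
      (off_len_le s q h rr r hn hh (by omega))
  unfold pvBlockG
  by_cases hpar : q % 2 = 0
  · rw [if_pos hpar, hfilter, hrowmap _ (fun r hr => List.mem_range.mp hr)]
    apply List.map_congr_left
    intro j hj
    have hj' : j < h := List.mem_range.mp hj
    unfold pvTgt
    rw [hsrc j hj', if_pos hpar]
  · rw [if_neg hpar, List.filter_reverse, hfilter, List.map_reverse,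
        hrowmap _ (fun r hr => List.mem_range.mp hr), rev_map_range]
    apply List.map_congr_left
    intro j hj
    have hj' : j < h := List.mem_range.mp hj
    unfold pvTgt
    rw [hsrc j hj', if_neg hpar]

-- the flattened full columns are the first w*rr characters of the gather
lemma flatten_full (s : List Char) (q h rr : Nat) (hn : s.length = q*rr + h)
    (hh : h < rr) :
    ∀ w, w ≤ q →
      ((List.range w).map (pvBlockG (pvRows s q h rr))).flatten
        = (List.range (w*rr)).map (pvTgt s rr q h) := by
  intro w
  induction w with
  | zero => simp
  | succ w ih =>
    intro hw
    rw [List.range_succ, List.map_append, List.flatten_append, ih (by omega)]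
    rw [show (w+1)*rr = w*rr + rr from Nat.succ_mul w rr, List.range_add,
        List.map_append]
    congr 1
    simp only [List.map_cons, List.map_nil, List.flatten_cons, List.flatten_nil,
      List.append_nil]
    rw [block_full s q h rr w hn hh (by omega)]
    simp

lemma decode_eq (s : List Char) (hs : s ≠ []) :
    farsanDecodeA s
      = (List.range s.length).map
          (fun k => s.getD (srcB (pvCeilSqrt s.length) (s.length / pvCeilSqrt s.length)
                              (s.length % pvCeilSqrt s.length) k) ' ') := by
  have hn : 1 ≤ s.length := by
    cases s with
    | nil => exact absurd rfl hs
    | cons a t => simp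
  set rr := pvCeilSqrt s.length with hrr
  have hrow1 : 1 ≤ rr := by
    rw [hrr]; unfold pvCeilSqrt
    split
    · rename_i h
      by_contra hc
      have h0 : Nat.sqrt s.length = 0 := by omega
      rw [h0] at h
      omega
    · omega
  have hrown : rr ≤ s.length := by
    rw [hrr]; unfold pvCeilSqrt
    split
    · rename_i h
      have hk : 1 ≤ Nat.sqrt s.length := by
        by_contra hc
        have h0 : Nat.sqrt s.length = 0 := by omega
        rw [h0] at h
        omega
      calc Nat.sqrt s.length ≤ Nat.sqrt s.length * Nat.sqrt s.length :=
            Nat.le_mul_of_pos_left _ hk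
        _ = s.length := h
    · rename_i h
      rcases Nat.lt_or_ge s.length 2 with h2 | h2
      · have h1 : s.length = 1 := by omega
        rw [h1] at h
        have hs1 : Nat.sqrt 1 = 1 := by decide
        rw [hs1] at h
        omega
      · have := Nat.sqrt_lt_self h2
        omega
  set q := s.length / rr with hq
  set h := s.length % rr with hh
  have hint : 1 ≤ q := (Nat.one_le_div_iff (by omega)).mpr hrown
  have hhang : h < rr := Nat.mod_lt s.length (by omega)
  have hsum : s.length = q * rr + h := by
    have h1 := Nat.div_add_mod s.length rr
    rw [← hq, ← hh] at h1
    have hc : rr * q = q * rr := Nat.mul_comm rr q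
    omega
  -- the rows A builds, in map-over-range form
  have hrows : farsanRowsLoop s q h (s.length + 1) 0 0 [] = pvRows s q h rr := by
    have h1 := rowsLoop_full s q h hint h (rr - h) (s.length + 1) 0 0 []
      (by omega)
      (by
        have h2 : h * (q + 1) = h * q + h := by ring
        have h3 : (rr - h) * q + h * q = rr * q := by
          rw [← Nat.add_mul]; congr 1; omega
        have hc : rr * q = q * rr := Nat.mul_comm rr q
        omega)
      (by omega)
    rw [h1, rowsOf_rep]
    unfold pvRows pvRow pvOff pvLen
    rw [show h + (rr - h) = rr by omega]
    simp
  -- width = len(rows[0])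
  have hwidth : ((pvRows s q h rr).headD []).length = (if 0 < h then q+1 else q) := by
    unfold pvRows
    rw [show rr = (rr - 1) + 1 by omega, List.range_succ_eq_map]
    simp only [List.map_cons, List.headD_cons]
    rw [row_length s q h 0 (off_len_le s q h rr 0 hsum hhang (by omega))]
    unfold pvLen
    rfl
  unfold farsanDecodeA
  simp only
  rw [← hq, ← hh, hrows, hwidth, cols_flatten]
  simp only
  by_cases hzero : 0 < h
  · rw [if_pos hzero, List.range_succ, List.map_append, List.flatten_append,
        flatten_full s q h rr hsum hhang q (le_refl q)]
    rw [show s.length = q*rr + h from hsum, List.range_add, List.map_append]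
    congr 1
    rw [show (List.map (pvBlockG (pvRows s q h rr)) [q]).flatten
          = pvBlockG (pvRows s q h rr) q by simp]
    rw [block_last s q h rr hsum hhang hint hzero]
    simp [pvTgt]
  · rw [if_neg hzero]
    have hh0 : h = 0 := by omega
    rw [flatten_full s q h rr hsum hhang q (le_refl q)]
    rw [show q * rr = s.length by omega]
    simp [pvTgt]

theorem decrypt_eq (strin : String) (h : strin ≠ "") :
    farsan_decrypt strin = farsan_decrypt_alt strin := by
  have hs : strin.toList ≠ [] := by
    intro hc
    exact h (String.toList_eq_nil_iff.mp hc)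
  unfold farsan_decrypt farsan_decrypt_alt
  rw [decode_eq strin.toList hs, rev_map_range]

-- ===== VERDICT =====
theorem farsan_decrypt_spec : Claim_equal_farsan_decrypt := by
  intro strin _ hpre
  unfold Spec_farsan_decrypt
  exact decrypt_eq strin hpre
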